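-- pv_equiv track=rewrite | github.com/wangpatrick57/leetcode | expressionEvaluationError/sol.py | to_11
-- ===== SOURCE A (Python) =====
-- def to_11(n):
--     digits = []
--     ans = 0
--
--     while n > 0:
--         digits.append(n % 10)
--         n //= 10
--
--     for digit in reversed(digits):
--         ans *= 11
--         ans += digit
--
--     return ans
-- ===== SOURCE B (Python) =====
-- def to_11(n):
--     if n <= 0:
--         return 0
--     return to_11(n // 10) * 11 + n % 10
-- ===== Notes on version B (the rewrite author's own statement) =====
-- stated objective: simpler
-- what changed: Replaces the two-phase digit-list build plus reverse-and-fold with a single direct recursion on the quotient-by-ten that accumulates the base-eleven value, eliminating the intermediate list and the reversal.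
import Mathlib
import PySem

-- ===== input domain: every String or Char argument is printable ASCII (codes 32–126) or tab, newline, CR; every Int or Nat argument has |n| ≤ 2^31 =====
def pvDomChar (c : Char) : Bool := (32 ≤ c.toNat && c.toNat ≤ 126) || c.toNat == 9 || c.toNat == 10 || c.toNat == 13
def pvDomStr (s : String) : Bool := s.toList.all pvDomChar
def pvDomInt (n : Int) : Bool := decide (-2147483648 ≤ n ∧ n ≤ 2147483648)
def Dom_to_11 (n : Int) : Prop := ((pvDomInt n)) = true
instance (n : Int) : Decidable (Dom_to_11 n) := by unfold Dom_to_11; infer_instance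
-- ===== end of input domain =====

-- B replaces A's digit-list build plus reverse-and-fold by a single direct recursion (simpler; no speed claim).

-- ===== PORT A =====
-- the 'while n > 0' loop collecting n % 10 and flooring n by 10 each step
def to11Digits (n : Int) : List Int :=
  if _h : 0 < n then
    PySem.Int.mod n 10 :: to11Digits (PySem.Int.floordiv n 10)
  else []
termination_by n.toNat
decreasing_by
  have h10 : PySem.Int.floordiv n 10 = n / 10 :=
    PySem.Int.floordiv_eq_ediv_of_pos (by norm_num)
  rw [h10]; omega

def to_11 (n : Int) : Int :=
  (to11Digits n).reverse.foldl (fun ans digit => ans * 11 + digit) 0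

-- ===== PORT B =====
def to_11_alt (n : Int) : Int :=
  if h : n ≤ 0 then 0
  else to_11_alt (PySem.Int.floordiv n 10) * 11 + PySem.Int.mod n 10
termination_by n.toNat
decreasing_by
  have h10 : PySem.Int.floordiv n 10 = n / 10 :=
    PySem.Int.floordiv_eq_ediv_of_pos (by norm_num)
  rw [h10]; omega

-- ===== PRECONDITION & SPEC =====
def Spec_to_11 (n : Int) (out : Int) : Prop := out = to_11_alt n
instance (n : Int) (out : Int) : Decidable (Spec_to_11 n out) := by unfold Spec_to_11; infer_instance

-- ===== CLAIM (what is proved, stated in full; the proofs are below) =====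
def Claim_equal_to_11 : Prop := ∀ (n : Int), Dom_to_11 n → Spec_to_11 n (to_11 n)

-- ===== LEMMAS AND PROOFS =====
theorem to_11_eq_alt (n : Int) : to_11 n = to_11_alt n := by
  induction n using to11Digits.induct with
  | case1 n h ih =>
    rw [to_11, to11Digits, dif_pos h, List.reverse_cons, List.foldl_append]
    rw [to_11_alt, dif_neg (by omega), ← ih, to_11]
    simp
  | case2 n h =>
    rw [to_11, to11Digits, dif_neg h, to_11_alt, dif_pos (by omega)]
    simp

-- ===== VERDICT (by name: the statement is the Claim_ definition above) =====
theorem to_11_spec : Claim_equal_to_11 := by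
  intro n _
  exact to_11_eq_alt n
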